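-- pv_equiv track=rewrite | github.com/Katy248/OAIP | OAIP/16.04/6/main.py | delete_nums
-- ===== SOURCE A (Python) =====
-- def delete_nums(array):
-- 	nums_to_del = []
-- 	for i in array:
-- 		if i % 5 == 0 and i % 7 == 0:
-- 			nums_to_del.append(i)
--
-- 	for i in nums_to_del:
-- 		array.remove(i)
--
-- 	return array
-- ===== SOURCE B (Python) =====
-- def delete_nums(array):
--     w = 0
--     for x in array:
--         if x % 35 != 0:
--             array[w] = x
--             w += 1
--     del array[w:]
--     return array
-- ===== Notes on version B (the rewrite author's own statement) =====
-- stated objective: alternative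
-- what changed: Replaces the collect-then-remove pair of loops (a deletion list followed by repeated .remove scans) with a single in-place two-pointer compaction pass using one divisibility test x % 35, truncating the tail with del array[w:]; same in-place+return contract.
import Mathlib
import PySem

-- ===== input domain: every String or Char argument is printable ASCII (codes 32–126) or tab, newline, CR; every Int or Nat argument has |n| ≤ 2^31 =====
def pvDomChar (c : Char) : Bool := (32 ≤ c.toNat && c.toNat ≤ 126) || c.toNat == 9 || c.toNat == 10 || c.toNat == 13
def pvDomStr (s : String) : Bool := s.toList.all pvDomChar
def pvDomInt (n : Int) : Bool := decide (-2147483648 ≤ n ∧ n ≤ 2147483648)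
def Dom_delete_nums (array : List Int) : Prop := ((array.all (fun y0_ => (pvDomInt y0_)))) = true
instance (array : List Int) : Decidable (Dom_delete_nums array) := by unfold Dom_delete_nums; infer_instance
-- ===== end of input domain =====

-- B replaces A's collect-then-remove pair of loops with one in-place two-pointer compaction pass;
-- both mutate the argument list in place in Python — the equivalence proved here is about the return value.

-- ===== PORT A =====
-- the second loop: array.remove(i); A only removes values it just collected from array, so the
-- ValueError branch (remove? = none) is unreachable; .getD there is exact on every reachable state.
def delete_nums (array : List Int) : List Int :=
  let nums_to_del : List Int :=
    array.foldl (fun acc i =>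
      if PySem.Int.mod i 5 = 0 ∧ PySem.Int.mod i 7 = 0 then acc ++ [i] else acc) []
  nums_to_del.foldl (fun arr i => (PySem.List.remove? arr i).getD arr) array

-- ===== PORT B =====
-- the for loop reads array[j] at step j; since the write index w never exceeds j, every value read
-- is the original one, so folding over a snapshot of the input list is exact.
def delete_nums_alt (array : List Int) : List Int :=
  let st : List Int × Nat :=
    array.foldl (fun (s : List Int × Nat) x =>
      if PySem.Int.mod x 35 ≠ 0 then (s.1.set s.2 x, s.2 + 1) else s) (array, 0)
  st.1.take st.2   -- del array[w:]

-- ===== PRECONDITION & SPEC =====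
def Spec_delete_nums (array : List Int) (out : List Int) : Prop := out = delete_nums_alt array
instance (array : List Int) (out : List Int) : Decidable (Spec_delete_nums array out) := by unfold Spec_delete_nums; infer_instance

-- ===== CLAIM (what is proved, stated in full; the proofs are below) =====
def Claim_equal_delete_nums : Prop := ∀ (array : List Int), Dom_delete_nums array → Spec_delete_nums array (delete_nums array)

-- ===== LEMMAS AND PROOFS =====

-- the two divisibility tests coincide
theorem pv_mod35 (i : Int) : ((5:Int) ∣ i ∧ (7:Int) ∣ i) ↔ (35:Int) ∣ i := by omega

-- A's first loop builds the filter of the list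
theorem pv_collect (array acc : List Int) :
    array.foldl (fun acc i => if (5:Int) ∣ i ∧ (7:Int) ∣ i then acc ++ [i] else acc) acc
    = acc ++ array.filter (fun i => decide ((35:Int) ∣ i)) := by
  induction array generalizing acc with
  | nil => simp
  | cons x t ih =>
    by_cases h : (35:Int) ∣ x
    · have h57 := (pv_mod35 x).mpr h
      simp [h, h57, ih]
    · have h57 : ¬ ((5:Int) ∣ x ∧ (7:Int) ∣ x) := fun hc => h ((pv_mod35 x).mp hc)
      simp [h, h57, ih]

-- one step of A's second loop on an element distinct from the head
theorem pv_rem_cons_ne (x i : Int) (t : List Int) (h : i ≠ x) :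
    (PySem.List.remove? (x :: t) i).getD (x :: t) = x :: (PySem.List.remove? t i).getD t := by
  rw [PySem.List.remove?_cons_of_ne _ (Ne.symm h)]
  cases PySem.List.remove? t i <;> simp

theorem pv_rem_skip (x : Int) (t l : List Int) (hx : ∀ i ∈ l, i ≠ x) :
    l.foldl (fun arr i => (PySem.List.remove? arr i).getD arr) (x :: t)
    = x :: l.foldl (fun arr i => (PySem.List.remove? arr i).getD arr) t := by
  induction l generalizing t with
  | nil => simp
  | cons i l ih =>
    simp only [List.foldl_cons]
    rw [pv_rem_cons_ne x i t (hx i (List.mem_cons_self))]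
    exact ih _ (fun j hj => hx j (List.mem_cons_of_mem _ hj))

-- A's second loop removes exactly the collected elements
theorem pv_remove_filter (array : List Int) :
    (array.filter (fun i => decide ((35:Int) ∣ i))).foldl
      (fun arr i => (PySem.List.remove? arr i).getD arr) array
    = array.filter (fun i => decide (¬ (35:Int) ∣ i)) := by
  induction array with
  | nil => simp
  | cons x t ih =>
    by_cases h : (35:Int) ∣ x
    · simp only [List.filter_cons, h, decide_true, if_true, List.foldl_cons,
        PySem.List.remove?_cons_self, Option.getD_some, not_true_eq_false, decide_false,
        Bool.false_eq_true, if_false]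
      exact ih
    · have hne : ∀ i ∈ t.filter (fun i => decide ((35:Int) ∣ i)), i ≠ x := by
        intro i hi hix
        exact h (by simpa [hix] using (List.of_mem_filter hi))
      simp only [List.filter_cons, h, decide_false, if_false, Bool.false_eq_true,
        not_false_eq_true, decide_true, if_true]
      rw [pv_rem_skip x t _ hne, ih]

-- B's compaction pass: running it on l over a buffer K ++ R (R long enough) yields K ++ filter l
theorem pv_compact (l K R : List Int) (hlen : l.length ≤ R.length) :
    (let st := l.foldl (fun (s : List Int × Nat) x =>
        if ¬ (35:Int) ∣ x then (s.1.set s.2 x, s.2 + 1) else s) (K ++ R, K.length)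
     st.1.take st.2)
    = K ++ l.filter (fun i => decide (¬ (35:Int) ∣ i)) := by
  induction l generalizing K R with
  | nil => simpa using List.take_left (l₁ := K) (l₂ := R)
  | cons x t ih =>
    cases R with
    | nil => simp at hlen
    | cons r R' =>
      have hlen' : t.length ≤ R'.length := by simpa using hlen
      by_cases h : (35:Int) ∣ x
      · simp only [List.foldl_cons, h, not_true_eq_false, if_false]
        have := ih K (r :: R') (le_trans hlen' (Nat.le_succ _))
        simpa [h] using this
      · simp only [List.foldl_cons, h, not_false_eq_true, if_true]
        have hset : (K ++ r :: R').set K.length x = (K ++ [x]) ++ R' := by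
          rw [List.set_append_right _ _ (le_refl K.length)]
          simp
        have := ih (K ++ [x]) R' hlen'
        rw [hset]
        simp only [List.length_append, List.length_singleton] at this ⊢
        rw [this]
        simp [List.filter_cons, h]

-- ===== VERDICT (by name: the statement is the Claim_ definition above) =====
theorem delete_nums_spec : Claim_equal_delete_nums := by
  intro array _
  show delete_nums array = delete_nums_alt array
  unfold delete_nums delete_nums_alt
  simp only [PySem.Int.mod_eq_zero_iff_dvd, ne_eq]
  rw [pv_collect array []]
  simp only [List.nil_append]
  rw [pv_remove_filter array]
  have := pv_compact array [] array (le_refl _)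
  simpa using this.symm
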